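-- pv_equiv track=rewrite | github.com/lueasf/DSA | 7_TP/Exam_2023/e2.py | validExpression
-- ===== SOURCE A (Python) =====
-- def validExpression(values, constraints):
--     def check_valid(perm):
--         curr = perm[0]
--         if (constraints[0] == 'P' and curr <= 0) or (constraints[0] == 'N' and curr >= 0):
--             return False
--         for i in range(1, len(perm)):
--             curr += perm[i]
--             if (constraints[i] == 'P' and curr <= 0) or (constraints[i] == 'N' and curr >= 0):
--                 return False
--         return True
--
--     def generate_permutations(current_perm, remaining):
--         if not remaining:
--             if check_valid(current_perm):
--                 return current_perm
--             return None
--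
--         for i in range(len(remaining)):
--             for sign in [1, -1]:
--                 new_perm = current_perm + [sign * remaining[i]]
--                 new_remaining = remaining[:i] + remaining[i+1:]
--                 result = generate_permutations(new_perm, new_remaining)
--                 if result:
--                     return result
--
--         return None
--
--     result = generate_permutations([], values)
--     return result if result else []
-- ===== SOURCE B (Python) =====
-- def validExpression(values, constraints):
--     def ok(perm):
--         total = 0
--         for i, v in enumerate(perm):
--             total += v
--             c = constraints[i]
--             if (c == 'P' and total <= 0) or (c == 'N' and total >= 0):
--                 return False
--         return True
--
--     # iterative DFS with an explicit stack; children pushed in reverse so the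
--     # LIFO pop order is element-major with +1 before -1
--     stack = [([], values)]
--     while stack:
--         perm, remaining = stack.pop()
--         if not remaining:
--             if ok(perm):
--                 return perm
--             continue
--         for i in reversed(range(len(remaining))):
--             rest = remaining[:i] + remaining[i + 1:]
--             v = remaining[i]
--             stack.append((perm + [-v], rest))
--             stack.append((perm + [v], rest))
--     return []
-- ===== Notes on version B (the rewrite author's own statement) =====
-- stated objective: alternative
-- what changed: Replaces the mutually-recursive backtracking search by an iterative DFS over an explicit stack of (perm, remaining) states, pushing children in reverse so the LIFO pop order reproduces A's preorder, and replaces the head-plus-loop validity check by a single enumerate loop over prefix sums.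
-- outside the precondition, e.g. on validExpression([0, 0], 'P'): A returns [], B returns []
import Mathlib
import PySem

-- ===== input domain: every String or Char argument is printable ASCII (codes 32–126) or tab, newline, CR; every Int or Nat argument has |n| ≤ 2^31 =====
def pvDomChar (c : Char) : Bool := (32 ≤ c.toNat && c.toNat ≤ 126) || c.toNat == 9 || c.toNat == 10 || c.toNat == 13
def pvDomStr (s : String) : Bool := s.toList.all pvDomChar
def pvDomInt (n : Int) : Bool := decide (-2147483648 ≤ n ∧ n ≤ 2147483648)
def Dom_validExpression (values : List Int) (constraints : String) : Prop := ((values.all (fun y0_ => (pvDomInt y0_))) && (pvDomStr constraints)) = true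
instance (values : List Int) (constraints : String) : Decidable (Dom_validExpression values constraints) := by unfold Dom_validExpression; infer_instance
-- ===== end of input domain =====

-- B rewrites A's recursive backtracking as an iterative DFS over an explicit stack
-- (children pushed in reverse so the LIFO pop order matches A's preorder); return values only.

-- ===== PORT A =====
-- for i in range(1, len(perm)): … with early return False.
-- constraints[i] is ported as getD ' ' : exact under Pre_ (i < perm.length ≤ constraints.length).
def chkLoopA (cs : List Char) (perm : List Int) (i : Nat) (curr : Int) : Bool :=
  if i < perm.length then
    let curr := curr + perm.getD i 0
    if ((cs.getD i ' ' == 'P') && decide (curr ≤ 0)) || ((cs.getD i ' ' == 'N') && decide (0 ≤ curr)) then false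
    else chkLoopA cs perm (i+1) curr
  else true
termination_by perm.length - i

-- check_valid: curr = perm[0] raises IndexError on []; that case is excluded by Pre_ ([] branch value arbitrary)
def checkValidA (cs : List Char) (perm : List Int) : Bool :=
  match perm with
  | [] => false
  | c :: _ =>
    if ((cs.getD 0 ' ' == 'P') && decide (c ≤ 0)) || ((cs.getD 0 ' ' == 'N') && decide (0 ≤ c)) then false
    else chkLoopA cs perm 1 c

mutual
-- generate_permutations
def genA (cs : List Char) (cur rem : List Int) : Option (List Int) :=
  if rem.isEmpty then
    if checkValidA cs cur then some cur else none
  else genLoopA cs cur rem 0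
  termination_by (rem.length, rem.length + 1)
-- for i in range(len(remaining)): sign +1 then -1, return first truthy result
def genLoopA (cs : List Char) (cur rem : List Int) (i : Nat) : Option (List Int) :=
  if i < rem.length then
    let v := rem.getD i 0
    let newRem := rem.take i ++ rem.drop (i+1)
    match genA cs (cur ++ [v]) newRem with
    | some r => some r
    | none =>
      match genA cs (cur ++ [-v]) newRem with
      | some r => some r
      | none => genLoopA cs cur rem (i+1)
  else none
  termination_by (rem.length, rem.length - i)
  decreasing_by
    · apply Prod.Lex.left; simp [List.length_take, List.length_drop]; omega
    · apply Prod.Lex.left; simp [List.length_take, List.length_drop]; omega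
    · apply Prod.Lex.right; omega
end

def validExpression (values : List Int) (constraints : String) : List Int :=
  match genA constraints.toList [] values with
  | some r => r
  | none => []

-- ===== PORT B =====
-- ok(perm): single enumerate loop over prefix sums
def okLoopB (cs : List Char) (perm : List Int) (i : Nat) (total : Int) : Bool :=
  if i < perm.length then
    let total := total + perm.getD i 0
    let c := cs.getD i ' '
    if ((c == 'P') && decide (total ≤ 0)) || ((c == 'N') && decide (0 ≤ total)) then false
    else okLoopB cs perm (i+1) total
  else true
termination_by perm.length - i

def okB (cs : List Char) (perm : List Int) : Bool := okLoopB cs perm 0 0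

-- for i in reversed(range(len(remaining))): push (perm+[-v],rest) then (perm+[v],rest)
-- (list head = stack top, so cons = append/push)
def pushRevB (perm rem : List Int) : Nat → List (List Int × List Int) → List (List Int × List Int)
  | 0, st => st
  | i+1, st =>
    let v := rem.getD i 0
    let rest := rem.take i ++ rem.drop (i+1)
    pushRevB perm rem i ((perm ++ [v], rest) :: (perm ++ [-v], rest) :: st)

-- termination measure for the stack loop
def stW : Nat → Nat
  | 0 => 0
  | m+1 => 2*(m+1)*(stW m + 1)

def stMeasure (st : List (List Int × List Int)) : Nat :=
  (st.map (fun s => stW s.2.length + 1)).sum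

theorem stMeasure_pushRevB (perm rem : List Int) :
    ∀ i st, i ≤ rem.length →
      stMeasure (pushRevB perm rem i st) = stMeasure st + 2*i*(stW (rem.length - 1) + 1) := by
  intro i
  induction i with
  | zero => intro st _; simp [pushRevB]
  | succ k ih =>
    intro st h
    have hk : k < rem.length := by omega
    rw [pushRevB, ih _ (by omega)]
    simp only [stMeasure, List.map_cons, List.sum_cons]
    have : (rem.take k ++ rem.drop (k+1)).length = rem.length - 1 := by
      simp [List.length_take, List.length_drop]; omega
    rw [this]; ring

-- while stack: pop; if remaining empty check-and-return else push children
def runB (cs : List Char) (st : List (List Int × List Int)) : List Int :=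
  match st with
  | [] => []
  | (perm, rem) :: rest =>
    match rem with
    | [] => if okB cs perm then perm else runB cs rest
    | x :: xs => runB cs (pushRevB perm (x :: xs) (x :: xs).length rest)
termination_by stMeasure st
decreasing_by
  · simp [stMeasure]
  · rw [stMeasure_pushRevB _ _ _ _ (le_refl _)]
    simp only [stMeasure, List.map_cons, List.sum_cons, List.length_cons,
      Nat.add_sub_cancel, stW]
    omega

def validExpression_alt (values : List Int) (constraints : String) : List Int :=
  runB constraints.toList [([], values)]

-- ===== PRECONDITION & SPEC =====
-- Pre_ excludes empty values (A raises IndexError at perm[0]) and inputs where constraints is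
-- shorter than values, on which A raises IndexError whenever a prefix check reaches a missing
-- constraint (on some such inputs every check fails early and A still returns []; those are
-- excluded too, and B returns the same [] there).
def Pre_validExpression (values : List Int) (constraints : String) : Prop :=
  values ≠ [] ∧ values.length ≤ constraints.toList.length
instance (values : List Int) (constraints : String) : Decidable (Pre_validExpression values constraints) := by
  unfold Pre_validExpression; infer_instance

def pvWitness_validExpression : List Int × String := ([1], "P")

def Spec_validExpression (values : List Int) (constraints : String) (out : List Int) : Prop := out = validExpression_alt values constraints
instance (values : List Int) (constraints : String) (out : List Int) : Decidable (Spec_validExpression values constraints out) := by unfold Spec_validExpression; infer_instance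

-- ===== CLAIM (what is proved, stated in full; the proofs are below) =====
def Claim_equal_validExpression : Prop := ∀ (values : List Int) (constraints : String), Dom_validExpression values constraints → Pre_validExpression values constraints → Spec_validExpression values constraints (validExpression values constraints)

-- ===== LEMMAS AND PROOFS =====

theorem chkLoopA_eq_okLoopB (cs : List Char) (perm : List Int) :
    ∀ k i curr, perm.length - i ≤ k → chkLoopA cs perm i curr = okLoopB cs perm i curr := by
  intro k
  induction k with
  | zero =>
    intro i curr h
    rw [chkLoopA, okLoopB]
    have : ¬ i < perm.length := by omega
    simp [this]
  | succ m ih =>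
    intro i curr h
    rw [chkLoopA, okLoopB]
    by_cases hi : i < perm.length
    · simp only [hi, if_true]
      split_ifs with hc
      · rfl
      · exact ih (i+1) _ (by omega)
    · simp [hi]

theorem checkValidA_eq_okB (cs : List Char) (perm : List Int) (h : perm ≠ []) :
    checkValidA cs perm = okB cs perm := by
  cases perm with
  | nil => exact absurd rfl h
  | cons c t =>
    rw [checkValidA, okB, okLoopB]
    have hl : 0 < (c :: t).length := by simp
    simp only [hl, if_true, List.getD_cons_zero, zero_add]
    split_ifs with hc
    · rfl
    · exact chkLoopA_eq_okLoopB cs (c :: t) (c :: t).length 1 c (by omega)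

-- the child states pushed for indices 0 … i-1, top of stack first
def chsB (perm rem : List Int) (i : Nat) : List (List Int × List Int) :=
  (List.range i).flatMap (fun j =>
    [(perm ++ [rem.getD j 0], rem.take j ++ rem.drop (j+1)),
     (perm ++ [-rem.getD j 0], rem.take j ++ rem.drop (j+1))])

theorem pushRevB_eq_chsB (perm rem : List Int) :
    ∀ i st, pushRevB perm rem i st = chsB perm rem i ++ st := by
  intro i
  induction i with
  | zero => intro st; simp [pushRevB, chsB]
  | succ k ih =>
    intro st
    rw [pushRevB, ih]
    simp [chsB, List.range_succ]

theorem runB_main (cs : List Char) :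
    ∀ n rem, rem.length ≤ n → ∀ perm st, (perm ≠ [] ∨ rem ≠ []) →
      runB cs ((perm, rem) :: st) =
        (match genA cs perm rem with | some r => r | none => runB cs st) := by
  intro n
  induction n with
  | zero =>
    intro rem hlen perm st hne
    have hrem : rem = [] := List.length_eq_zero_iff.mp (by omega)
    subst hrem
    have hp : perm ≠ [] := hne.resolve_right (fun h => h rfl)
    rw [runB, genA, checkValidA_eq_okB cs perm hp]
    simp only [List.isEmpty_nil, if_true]
    split_ifs with h <;> rfl
  | succ m ih =>
    intro rem hlen perm st hne
    cases rem with
    | nil =>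
      have hp : perm ≠ [] := hne.resolve_right (fun h => h rfl)
      rw [runB, genA, checkValidA_eq_okB cs perm hp]
      simp only [List.isEmpty_nil, if_true]
      split_ifs with h <;> rfl
    | cons a t =>
      rw [runB, genA]
      simp only [List.isEmpty_cons, Bool.false_eq_true, if_false]
      rw [pushRevB_eq_chsB]
      -- inner induction over suffixes of the child list
      have key : ∀ k i, i + k = (a :: t).length →
          runB cs ((List.range' i k).flatMap (fun j =>
              [(perm ++ [(a :: t).getD j 0], (a :: t).take j ++ (a :: t).drop (j+1)),
               (perm ++ [-(a :: t).getD j 0], (a :: t).take j ++ (a :: t).drop (j+1))]) ++ st) =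
            (match genLoopA cs perm (a :: t) i with | some r => r | none => runB cs st) := by
        intro k
        induction k with
        | zero =>
          intro i hik
          rw [genLoopA]
          have h1 : ¬ i < (a :: t).length := by omega
          have h2 : ¬ i ≤ t.length := by
            simp only [List.length_cons] at hik; omega
          simp [h2]
        | succ q ihq =>
          intro i hik
          have hi : i < (a :: t).length := by omega
          have hrest : ((a :: t).take i ++ (a :: t).drop (i+1)).length ≤ m := by
            simp only [List.length_append, List.length_take, List.length_drop,
              List.length_cons] at *
            omega
          rw [List.range'_succ]
          simp only [List.flatMap_cons, List.cons_append, List.append_assoc]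
          rw [ih _ hrest (perm ++ [(a :: t).getD i 0]) _ (Or.inl (by simp))]
          rw [genLoopA]
          simp only [hi, if_true]
          cases h1 : genA cs (perm ++ [(a :: t).getD i 0]) ((a :: t).take i ++ (a :: t).drop (i+1)) with
          | some r => simp
          | none =>
            simp only
            rw [ih _ hrest (perm ++ [-(a :: t).getD i 0]) _ (Or.inl (by simp))]
            cases h2 : genA cs (perm ++ [-(a :: t).getD i 0]) ((a :: t).take i ++ (a :: t).drop (i+1)) with
            | some r => simp
            | none =>
              simp only
              have := ihq (i+1) (by omega)
              simpa using this
      have hkey := key (a :: t).length 0 (by omega)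
      simpa [chsB, List.range_eq_range'] using hkey

-- ===== VERDICT (by name: the statement is the Claim_ definition above) =====
theorem validExpression_spec : Claim_equal_validExpression := by
  intro values constraints _ hpre
  unfold Spec_validExpression validExpression validExpression_alt
  rw [runB_main constraints.toList values.length values (le_refl _) [] [] (Or.inr hpre.1)]
  cases h : genA constraints.toList [] values with
  | some r => simp
  | none => simp [runB]
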